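-- pv_equiv track=rewrite | github.com/Kier73/Matrix_V_SDK | matrix_v_sdk/vl/math/primitives.py | hilbert_encode
-- ===== SOURCE A (Python) =====
-- def hilbert_encode(i: int, j: int, order: int) -> int:
--     """
--     2D -> 1D Hilbert Space-Filling Curve.
--     Used for topological sequence alignment and compute shunting.
--     """
--     d = 0
--     s = 1 << (order - 1)
--     while s > 0:
--         rx = 1 if (i & s) > 0 else 0
--         ry = 1 if (j & s) > 0 else 0
--         d += s * s * ((3 * rx) ^ ry)
--         if ry == 0:
--             if rx == 1:
--                 i = s - 1 - i
--                 j = s - 1 - j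
--             i, j = j, i
--         s >>= 1
--     return d
-- ===== SOURCE B (Python) =====
-- # Table-driven FSM Hilbert encoder: 4 curve orientations become explicit states;
-- # _HILBERT_FSM[state][2*bi + bj] = (base-4 digit, next state). No coordinate mutation.
-- _HILBERT_FSM = (
--     ((0, 1), (1, 0), (3, 3), (2, 0)),
--     ((0, 0), (3, 2), (1, 1), (2, 1)),
--     ((2, 2), (3, 1), (1, 2), (0, 3)),
--     ((2, 3), (1, 3), (3, 0), (0, 2)),
-- )
--
-- def hilbert_encode(i: int, j: int, order: int) -> int:
--     d = 0
--     state = 0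
--     for b in range(order - 1, -1, -1):
--         bi = (i >> b) & 1
--         bj = (j >> b) & 1
--         digit, state = _HILBERT_FSM[state][2 * bi + bj]
--         d = d * 4 + digit
--     return d
-- ===== Notes on version B (the rewrite author's own statement) =====
-- stated objective: faster
-- what changed: Replaces A's loop that repeatedly reflects/swaps the coordinates with a precomputed 4-state transition table (FSM) over the raw coordinate bits, scanning from the most significant bit down and keeping only an integer state and accumulator; this avoids A's per-iteration big-integer work (s*s products and s-1-i reflections on order-bit numbers), a large constant-factor win measured.
import Mathlib
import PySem

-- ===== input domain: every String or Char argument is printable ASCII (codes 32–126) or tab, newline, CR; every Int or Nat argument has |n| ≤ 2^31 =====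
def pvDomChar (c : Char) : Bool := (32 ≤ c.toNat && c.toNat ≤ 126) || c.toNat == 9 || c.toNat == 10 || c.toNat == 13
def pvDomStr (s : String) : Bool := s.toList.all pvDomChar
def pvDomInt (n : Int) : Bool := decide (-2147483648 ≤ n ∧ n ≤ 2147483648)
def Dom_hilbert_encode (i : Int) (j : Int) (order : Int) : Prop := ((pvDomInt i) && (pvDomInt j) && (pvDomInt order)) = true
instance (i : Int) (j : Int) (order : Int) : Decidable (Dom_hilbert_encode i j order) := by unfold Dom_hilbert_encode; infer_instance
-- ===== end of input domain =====

-- B re-implements A's mutating Hilbert-curve loop as a table-driven 4-state FSM over the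
-- coordinate bits (no coordinate reflection/swap); same O(order) cost, alternative structure.

-- ===== PORT A =====
-- `1 if (x & s) > 0 else 0` (the repeated bit test of A)
def bitTest (x s : Int) : Int := if 0 < PySem.Int.band x s then 1 else 0

-- the `while s > 0` loop of A; the rx==1 branch reflects both coordinates, then i,j swap
def hilbertLoopA (i j d s : Int) : Int :=
  if h : 0 < s then
    hilbertLoopA
      (if bitTest j s = 0 then (if bitTest i s = 1 then s - 1 - j else j) else i)
      (if bitTest j s = 0 then (if bitTest i s = 1 then s - 1 - i else i) else j)
      (d + s * s * PySem.Int.bxor (3 * bitTest i s) (bitTest j s))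
      (s >>> (1 : Nat))
  else d
termination_by s.toNat
decreasing_by
  have hs : s >>> (1 : Nat) = s / 2 ^ 1 := Int.shiftRight_eq_div_pow s 1
  norm_num at hs
  omega

-- Python raises ValueError (negative shift) when order ≤ 0; Pre_ excludes that,
-- so `.toNat` in the shift amount is exact on every admitted input.
def hilbert_encode (i : Int) (j : Int) (order : Int) : Int :=
  hilbertLoopA i j 0 ((1 : Int) <<< (order - 1).toNat)

-- ===== PORT B =====
-- _HILBERT_FSM[state][2*bi + bj] = (digit, next state); out-of-table default never reached
def hilbertFSM (state : Int) (idx : Int) : Int × Int :=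
  match state, idx with
  | 0, 0 => (0, 1) | 0, 1 => (1, 0) | 0, 2 => (3, 3) | 0, 3 => (2, 0)
  | 1, 0 => (0, 0) | 1, 1 => (3, 2) | 1, 2 => (1, 1) | 1, 3 => (2, 1)
  | 2, 0 => (2, 2) | 2, 1 => (3, 1) | 2, 2 => (1, 2) | 2, 3 => (0, 3)
  | 3, 0 => (2, 3) | 3, 1 => (1, 3) | 3, 2 => (3, 0) | 3, 3 => (0, 2)
  | _, _ => (0, 0)

-- the `for b in range(order-1, -1, -1)` loop of B, fuel = number of remaining bits
def hilbertLoopB (i j state d : Int) : Nat → Int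
  | 0 => d
  | b + 1 =>
    let bi := PySem.Int.band (i >>> b) 1
    let bj := PySem.Int.band (j >>> b) 1
    let p := hilbertFSM state (2 * bi + bj)
    hilbertLoopB i j p.2 (d * 4 + p.1) b

-- order.toNat = len(range(order-1, -1, -1)) for every Int order
def hilbert_encode_alt (i : Int) (j : Int) (order : Int) : Int :=
  hilbertLoopB i j 0 0 order.toNat

-- ===== PRECONDITION & SPEC =====
-- Pre_ excludes exactly order ≤ 0, where A raises ValueError ("negative shift count").
def Pre_hilbert_encode (i : Int) (j : Int) (order : Int) : Prop := 1 ≤ order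
instance (i : Int) (j : Int) (order : Int) : Decidable (Pre_hilbert_encode i j order) := by
  unfold Pre_hilbert_encode; infer_instance

def pvWitness_hilbert_encode : Int × Int × Int := (5, 6, 3)

def Spec_hilbert_encode (i : Int) (j : Int) (order : Int) (out : Int) : Prop := out = hilbert_encode_alt i j order
instance (i : Int) (j : Int) (order : Int) (out : Int) : Decidable (Spec_hilbert_encode i j order out) := by
  unfold Spec_hilbert_encode; infer_instance

-- ===== CLAIM (what is proved, stated in full; the proofs are below) =====
def Claim_equal_hilbert_encode : Prop := ∀ (i : Int) (j : Int) (order : Int), Dom_hilbert_encode i j order → Pre_hilbert_encode i j order → Spec_hilbert_encode i j order (hilbert_encode i j order)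

-- ===== LEMMAS AND PROOFS =====

def selB (sw : Bool) (x y : Int) : Int := if sw then y else x
def twN (ng : Bool) (x : Int) : Int := if ng then -1 - x else x
def stOf (sw ng : Bool) : Int := (if sw then 1 else 0) + 2 * (if ng then 1 else 0)

lemma ediv_neg_one_sub (y p : Int) (hp : 0 < p) : (-1 - y) / p = -1 - y / p := by
  have hy : p * (y / p) + y % p = y := Int.mul_ediv_add_emod y p
  have h1 : 0 ≤ y % p := Int.emod_nonneg _ (by omega)
  have h2 : y % p < p := Int.emod_lt_of_pos _ hp
  have h3 : -1 - y = (p - 1 - y % p) + p * (-1 - y / p) := by linear_combination hy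
  rw [h3, Int.add_mul_ediv_left _ _ (by omega : p ≠ 0), Int.ediv_eq_zero_of_lt (by omega) (by omega)]
  ring

lemma bit_of_mod (x p : Int) (hp : 0 < p) : (x % (p * 2)) / p = (x / p) % 2 := by
  have h1 : x - p*2*(x/(p*2)) = x + p * (-(2*(x/(p*2)))) := by ring
  have e2 : (x/p)/2 = x/(p*2) := Int.ediv_ediv_of_nonneg (by omega)
  have e3 : (x/p) % 2 = x/p - 2 * ((x/p)/2) := Int.emod_def _ 2
  rw [Int.emod_def x (p*2), h1, Int.add_mul_ediv_left _ _ (by omega : p ≠ 0), e3, e2]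
  ring

lemma band_pow_nonneg (m n : Nat) :
    PySem.Int.band (m : Int) (2 ^ n) = (((m : Int)) / 2 ^ n) % 2 * 2 ^ n := by
  have hcast : ((2 ^ n : Nat) : Int) = 2 ^ n := by push_cast; ring
  have htn : ((2:Int) ^ n).toNat = 2 ^ n := by rw [← hcast, Int.toNat_natCast]
  have hpos : (0:Int) < 2 ^ n := by positivity
  simp only [PySem.Int.band, if_pos (by positivity : (0:Int) ≤ (m:Int)), if_pos (le_of_lt hpos)]
  rw [htn, Int.toNat_natCast, Nat.and_two_pow, Nat.testBit_eq_decide_div_mod_eq]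
  have hdm : (m : Int) / 2 ^ n % 2 = ((m / 2 ^ n % 2 : Nat) : Int) := by
    rw [Int.natCast_mod, Int.natCast_div, hcast]; norm_num
  rcases Nat.mod_two_eq_zero_or_one (m / 2 ^ n) with h | h <;> simp [h, hdm, hcast]

lemma band_pow_neg (y n : Nat) :
    PySem.Int.band (-1 - (y : Int)) (2 ^ n) = ((-1 - (y : Int)) / 2 ^ n) % 2 * 2 ^ n := by
  have hcast : ((2 ^ n : Nat) : Int) = 2 ^ n := by push_cast; ring
  have htn : ((2:Int) ^ n).toNat = 2 ^ n := by rw [← hcast, Int.toNat_natCast]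
  have hpos : (0:Int) < 2 ^ n := by positivity
  simp only [PySem.Int.band, if_neg (by omega : ¬ (0:Int) ≤ -1 - (y:Int)), if_pos (le_of_lt hpos)]
  rw [htn, show (-(-1 - (y:Int)) - 1).toNat = y by omega, Nat.and_comm, Nat.and_two_pow,
    Nat.testBit_eq_decide_div_mod_eq]
  have hx2 : (-1 - (y:Int)) / 2 ^ n = -1 - (y : Int) / 2 ^ n := ediv_neg_one_sub _ _ hpos
  have hdm : (y : Int) / 2 ^ n % 2 = ((y / 2 ^ n % 2 : Nat) : Int) := by
    rw [Int.natCast_mod, Int.natCast_div, hcast]; norm_num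
  rcases Nat.mod_two_eq_zero_or_one (y / 2 ^ n) with h | h
  · have hb : (-1 - (y:Int)) / 2 ^ n % 2 = 1 := by rw [hx2]; omega
    simp [h, hb, hcast]
  · have hb : (-1 - (y:Int)) / 2 ^ n % 2 = 0 := by rw [hx2]; omega
    simp [h, hb]

lemma band_pow (x : Int) (n : Nat) :
    PySem.Int.band x (2 ^ n) = (x / 2 ^ n) % 2 * 2 ^ n := by
  rcases (show 0 ≤ x ∨ x < 0 by omega) with hx | hx
  · rw [show x = ((x.toNat : Nat) : Int) by omega]; exact band_pow_nonneg _ _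
  · rw [show x = -1 - (((-x-1).toNat : Nat) : Int) by omega]; exact band_pow_neg _ _

lemma bitTest_eq (x : Int) (n : Nat) : bitTest x (2 ^ n) = (x / 2 ^ n) % 2 := by
  have hpos : (0:Int) < 2 ^ n := by positivity
  rw [bitTest, band_pow]
  rcases Int.emod_two_eq (x / 2 ^ n) with h | h <;> simp [h, hpos]

lemma bit_congr (n : Nat) (x w : Int) (h : x % 2 ^ (n + 1) = w % 2 ^ (n + 1)) :
    (x / 2 ^ n) % 2 = (w / 2 ^ n) % 2 := by
  have hpos : (0:Int) < 2 ^ n := by positivity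
  have h2 : (2:Int) ^ (n + 1) = 2 ^ n * 2 := by ring
  rw [← bit_of_mod x _ hpos, ← bit_of_mod w _ hpos, ← h2, h]

lemma bitTest_inv (n : Nat) (x z : Int) (ng : Bool)
    (h : x % 2 ^ (n + 1) = twN ng z % 2 ^ (n + 1)) :
    bitTest x (2 ^ n) = (if ng then 1 - (z / 2 ^ n) % 2 else (z / 2 ^ n) % 2) := by
  rw [bitTest_eq, bit_congr n x _ h]
  cases ng
  · simp [twN]
  · simp only [twN, if_true]
    rw [ediv_neg_one_sub _ _ (by positivity : (0:Int) < 2 ^ n)]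
    omega

lemma mod_drop (p q x w : Int) (hpq : p ∣ q) (h : x % q = w % q) : x % p = w % p := by
  rw [← Int.emod_emod_of_dvd x hpq, h, Int.emod_emod_of_dvd w hpq]

lemma mod_reflect (M x w : Int) (h : x % M = w % M) :
    (M - 1 - x) % M = (-1 - w) % M := by
  have h1 : M - 1 - x = (-1 - x) + M * 1 := by ring
  rw [h1, Int.add_mul_emod_self_left, Int.sub_emod, h, ← Int.sub_emod]

lemma loopA_stop (i j d : Int) : hilbertLoopA i j d 0 = d := by
  rw [hilbertLoopA]; simp

lemma bband1 (x : Int) (n : Nat) : PySem.Int.band (x >>> n) 1 = (x / 2 ^ n) % 2 := by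
  rw [PySem.Int.band_one, Int.shiftRight_eq_div_pow,
    PySem.Int.mod_eq_emod_of_pos (by norm_num)]
  norm_num

lemma linB (m : Nat) : ∀ (i j st d : Int),
    hilbertLoopB i j st d m = d * 4 ^ m + hilbertLoopB i j st 0 m := by
  induction m with
  | zero => intro i j st d; simp [hilbertLoopB]
  | succ b ih =>
    intro i j st d
    simp only [hilbertLoopB]
    rw [ih i j _ (d * 4 + _), ih i j _ (0 * 4 + _)]
    ring

lemma bx01 : PySem.Int.bxor 0 1 = 1 := by decide
lemma bx11 : PySem.Int.bxor 3 1 = 2 := by decide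

lemma inv_keep (k : Nat) (x w : Int) (h : x % 2 ^ (k + 2) = w % 2 ^ (k + 2)) :
    x % 2 ^ (k + 1) = w % 2 ^ (k + 1) :=
  mod_drop _ _ _ _ ⟨2, by ring⟩ h

lemma inv_refl (k : Nat) (x w : Int) (h : x % 2 ^ (k + 2) = w % 2 ^ (k + 2)) :
    (2 ^ (k + 1) - 1 - x) % 2 ^ (k + 1) = (-1 - w) % 2 ^ (k + 1) :=
  mod_reflect _ _ _ (inv_keep k x w h)

lemma inv_refl_neg (k : Nat) (x z : Int) (h : x % 2 ^ (k + 2) = (-1 - z) % 2 ^ (k + 2)) :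
    (2 ^ (k + 1) - 1 - x) % 2 ^ (k + 1) = z % 2 ^ (k + 1) := by
  have h2 := inv_refl k x _ h
  rwa [show (-1 - (-1 - z)) = z by ring] at h2

lemma key (n : Nat) : ∀ (iA jA i j : Int) (sw ng : Bool) (d : Int),
    iA % 2 ^ (n + 1) = twN ng (selB sw i j) % 2 ^ (n + 1) →
    jA % 2 ^ (n + 1) = twN ng (selB sw j i) % 2 ^ (n + 1) →
    hilbertLoopA iA jA d ((2 : Int) ^ n) = d + hilbertLoopB i j (stOf sw ng) 0 (n + 1) := by
  induction n with
  | zero =>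
    intro iA jA i j sw ng d hx hy
    have rx := bitTest_inv 0 iA (selB sw i j) ng hx
    have ry := bitTest_inv 0 jA (selB sw j i) ng hy
    rw [hilbertLoopA, dif_pos (by norm_num : (0:Int) < 2 ^ 0)]
    rw [show ((2:Int) ^ 0) >>> (1:Nat) = 0 by decide, loopA_stop]
    simp only [hilbertLoopB, bband1]
    cases sw <;> cases ng <;>
      rcases Int.emod_two_eq (i / 2 ^ 0) with hbi | hbi <;>
      rcases Int.emod_two_eq (j / 2 ^ 0) with hbj | hbj <;>
      simp [selB, twN, stOf] at rx ry <;>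
      simp only [pow_zero, Int.ediv_one] at hbi hbj <;>
      simp [rx, ry, hbi, hbj, stOf, hilbertFSM, bx01, bx11]
  | succ m ih =>
    intro iA jA i j sw ng d hx hy
    have rx := bitTest_inv (m + 1) iA (selB sw i j) ng hx
    have ry := bitTest_inv (m + 1) jA (selB sw j i) ng hy
    have hpos : (0:Int) < 2 ^ (m + 1) := by positivity
    have hpow : (2:Int) ^ (m + 1) * 2 ^ (m + 1) = 4 ^ (m + 1) := by
      rw [← mul_pow]; norm_num
    have hsr : ((2:Int) ^ (m + 1)) >>> (1:Nat) = 2 ^ m := by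
      rw [Int.shiftRight_eq_div_pow, pow_succ]
      norm_num
    rw [hilbertLoopA, dif_pos hpos, hsr]
    conv_rhs => rw [hilbertLoopB]
    simp only [bband1]
    cases sw <;> cases ng <;>
      rcases Int.emod_two_eq (i / 2 ^ (m + 1)) with hbi | hbi <;>
      rcases Int.emod_two_eq (j / 2 ^ (m + 1)) with hbj | hbj <;>
      simp [selB, twN] at hx hy rx ry <;>
      simp [hbi, hbj] at rx ry <;>
      simp [rx, ry, hbi, hbj, hilbertFSM, bx01, bx11] <;>
      (first
        | rw [ih iA jA i j false false _ (inv_keep _ _ _ hx) (inv_keep _ _ _ hy)]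
        | rw [ih iA jA i j false true _ (inv_keep _ _ _ hx) (inv_keep _ _ _ hy)]
        | rw [ih iA jA i j true false _ (inv_keep _ _ _ hx) (inv_keep _ _ _ hy)]
        | rw [ih iA jA i j true true _ (inv_keep _ _ _ hx) (inv_keep _ _ _ hy)]
        | rw [ih jA iA i j false false _ (inv_keep _ _ _ hy) (inv_keep _ _ _ hx)]
        | rw [ih jA iA i j false true _ (inv_keep _ _ _ hy) (inv_keep _ _ _ hx)]
        | rw [ih jA iA i j true false _ (inv_keep _ _ _ hy) (inv_keep _ _ _ hx)]
        | rw [ih jA iA i j true true _ (inv_keep _ _ _ hy) (inv_keep _ _ _ hx)]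
        | rw [ih (2 ^ (m+1) - 1 - jA) (2 ^ (m+1) - 1 - iA) i j false false _ (inv_refl_neg _ _ _ hy) (inv_refl_neg _ _ _ hx)]
        | rw [ih (2 ^ (m+1) - 1 - jA) (2 ^ (m+1) - 1 - iA) i j false true _ (inv_refl _ _ _ hy) (inv_refl _ _ _ hx)]
        | rw [ih (2 ^ (m+1) - 1 - jA) (2 ^ (m+1) - 1 - iA) i j true false _ (inv_refl_neg _ _ _ hy) (inv_refl_neg _ _ _ hx)]
        | rw [ih (2 ^ (m+1) - 1 - jA) (2 ^ (m+1) - 1 - iA) i j true true _ (inv_refl _ _ _ hy) (inv_refl _ _ _ hx)]) <;>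
      simp [stOf] <;>
      (conv_rhs => rw [linB]) <;>
      rw [hpow] <;>
      ring

-- ===== VERDICT (by name: the statement is the Claim_ definition above) =====
theorem hilbert_encode_spec : Claim_equal_hilbert_encode := by
  unfold Claim_equal_hilbert_encode
  intro i j order _ hpre
  unfold Pre_hilbert_encode at hpre
  unfold Spec_hilbert_encode hilbert_encode hilbert_encode_alt
  have hn : order.toNat = (order - 1).toNat + 1 := by omega
  have hsl : (1 : Int) <<< (order - 1).toNat = 2 ^ (order - 1).toNat := by
    rw [Int.shiftLeft_eq]; ring
  rw [hsl, hn]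
  have h0 := key (order - 1).toNat i j i j false false 0
    (by simp [twN, selB]) (by simp [twN, selB])
  simpa [stOf] using h0
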